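-- pv_equiv track=rewrite | github.com/ihamdy719/Algorithmic-Problem-Solutions | Project 3- Balanced String/balanced string.py | longest_balanced_substring
-- ===== SOURCE A (Python) =====
-- def is_balanced(sub):
--     # نحسب تكرار كل حرف في الـ substring
--     freq = {}
--     for ch in sub:
--         if ch not in freq:
--             freq[ch] = 1
--         else:
--             freq[ch] += 1
--
--     # لازم يكون فيها حرفين مختلفين بالظبط
--     if len(freq) != 2:
--         return False
--
--     # نجيب عدد التكرارات
--     values = list(freq.values())
--
--     # لازم يكونوا متساويين وكل واحد فيهم > 1
--     return values[0] == values[1] and values[0] > 1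
--
-- def longest_balanced_substring(S):
--     n = len(S)
--     max_len = 0
--     longest_sub = ""
--
--     # نجرب كل substring ممكنة
--     for i in range(n):
--         for j in range(i + 1, n + 1):
--             sub = S[i:j]
--             if is_balanced(sub):
--                 if len(sub) > max_len:
--                     max_len = len(sub)
--                     longest_sub = sub
--
--     return max_len, longest_sub
-- ===== SOURCE B (Python) =====
-- def longest_balanced_substring(S):
--     n = len(S)
--     max_len = 0
--     longest_sub = ""
--     # One pass per start index: maintain an incremental frequency dict instead of
--     # rebuilding it from scratch for every substring (drops A's per-substring rebuild).
--     for i in range(n):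
--         freq = {}
--         for j in range(i, n):
--             ch = S[j]
--             freq[ch] = freq.get(ch, 0) + 1
--             if len(freq) == 2:
--                 v = list(freq.values())
--                 if v[0] == v[1] and v[0] > 1 and j - i + 1 > max_len:
--                     max_len = j - i + 1
--                     longest_sub = S[i:j + 1]
--     return max_len, longest_sub
-- ===== Notes on version B (the rewrite author's own statement) =====
-- stated objective: faster
-- what changed: Instead of materialising every substring and rebuilding a frequency dict from scratch for each one (with an is_balanced helper), B fixes each start index once and extends the end, maintaining a single incremental frequency dict and checking balance in place.
import Mathlib
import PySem

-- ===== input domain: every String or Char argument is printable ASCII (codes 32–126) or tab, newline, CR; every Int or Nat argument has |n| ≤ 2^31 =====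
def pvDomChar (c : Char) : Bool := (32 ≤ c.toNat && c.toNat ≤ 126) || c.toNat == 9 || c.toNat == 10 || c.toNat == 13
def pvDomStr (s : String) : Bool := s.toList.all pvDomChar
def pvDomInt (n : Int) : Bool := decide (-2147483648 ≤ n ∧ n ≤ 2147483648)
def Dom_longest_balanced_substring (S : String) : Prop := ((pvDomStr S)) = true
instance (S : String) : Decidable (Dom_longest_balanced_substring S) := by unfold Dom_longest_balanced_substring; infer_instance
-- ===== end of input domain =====

-- B replaces A's rebuild-a-frequency-dict-per-substring scan (O(n^3)) by one incremental
-- frequency dict per start index (O(n^2) dict steps); objective: faster.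

-- ===== PORT A =====
-- freq-building loop of is_balanced
def pvFreqA (sub : List Char) : PySem.Dict Char Int :=
  sub.foldl
    (fun freq ch => if freq.contains ch = false then freq.insert ch 1 else freq.modify ch 0 (· + 1))
    PySem.Dict.empty

def is_balanced (sub : List Char) : Bool :=
  let freq := pvFreqA sub
  if freq.size ≠ 2 then false
  else
    let values := freq.values
    decide (PySem.List.pyGetD values 0 (0 : Int) = PySem.List.pyGetD values 1 (0 : Int)) &&
      decide (PySem.List.pyGetD values 0 (0 : Int) > 1)

-- body of A's inner loop over j
def pvStepA (s : List Char) (i : Int) (acc : Int × List Char) (j : Int) : Int × List Char :=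
  let sub := PySem.List.slice s (some i) (some j)
  if is_balanced sub then
    if PySem.List.len sub > acc.1 then (PySem.List.len sub, sub) else acc
  else acc

def longest_balanced_substring (S : String) : Int × String :=
  let s := S.toList
  let n := PySem.List.len s
  let r := (PySem.List.pyRange 0 n 1).foldl
    (fun acc i => (PySem.List.pyRange (i + 1) (n + 1) 1).foldl (pvStepA s i) acc)
    ((0 : Int), ([] : List Char))
  (r.1, String.ofList r.2)

-- ===== PORT B =====
-- body of B's inner loop over j; state = (freq, max_len, longest_sub)
def pvStepB (s : List Char) (i : Int)
    (st : PySem.Dict Char Int × Int × List Char) (j : Int) :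
    PySem.Dict Char Int × Int × List Char :=
  let ch := PySem.List.pyGetD s j ' '
  let freq := st.1.insert ch (st.1.getD ch 0 + 1)
  if freq.size = 2 then
    let v := freq.values
    if PySem.List.pyGetD v 0 (0 : Int) = PySem.List.pyGetD v 1 (0 : Int) ∧
        PySem.List.pyGetD v 0 (0 : Int) > 1 ∧ j - i + 1 > st.2.1 then
      (freq, j - i + 1, PySem.List.slice s (some i) (some (j + 1)))
    else (freq, st.2)
  else (freq, st.2)

def longest_balanced_substring_alt (S : String) : Int × String :=
  let s := S.toList
  let n := PySem.List.len s
  let r := (PySem.List.pyRange 0 n 1).foldl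
    (fun acc i =>
      ((PySem.List.pyRange i n 1).foldl (pvStepB s i)
        ((PySem.Dict.empty : PySem.Dict Char Int), acc.1, acc.2)).2)
    ((0 : Int), ([] : List Char))
  (r.1, String.ofList r.2)

-- ===== PRECONDITION & SPEC =====
def Spec_longest_balanced_substring (S : String) (out : Int × String) : Prop := out = longest_balanced_substring_alt S
instance (S : String) (out : Int × String) : Decidable (Spec_longest_balanced_substring S out) := by unfold Spec_longest_balanced_substring; infer_instance

-- ===== CLAIM (what is proved, stated in full; the proofs are below) =====
def Claim_equal_longest_balanced_substring : Prop := ∀ (S : String), Dom_longest_balanced_substring S → Spec_longest_balanced_substring S (longest_balanced_substring S)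

-- ===== LEMMAS AND PROOFS =====

-- A's per-character update coincides with Counter's update
lemma pvFreqA_step (d : PySem.Dict Char Int) (ch : Char) :
    (if d.contains ch = false then d.insert ch 1 else d.modify ch 0 (· + 1))
      = d.modify ch 0 (· + 1) := by
  by_cases h : d.contains ch
  · simp [h]
  · simp only [Bool.not_eq_true] at h
    simp [h, PySem.Dict.modify, PySem.Dict.getD_of_not_contains d (0 : Int) h]

lemma pvFreqA_eq_counter (sub : List Char) : pvFreqA sub = PySem.Dict.counter sub := by
  unfold pvFreqA
  rw [PySem.List.foldl_congr_mem _ _ (fun d ch => d.modify ch 0 (· + 1)) _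
      (fun d ch _ => pvFreqA_step d ch), ← PySem.Dict.counter_eq_foldl]

-- extending the slice by one character
lemma slice_succ (s : List Char) (i j : Int) (hi : 0 ≤ i) (hij : i ≤ j)
    (hj : j < (s.length : Int)) :
    PySem.List.slice s (some i) (some (j + 1))
      = PySem.List.slice s (some i) (some j) ++ [s[j.toNat]] := by
  rw [PySem.List.slice_toNat s hi (by omega), PySem.List.slice_toNat s hi (by omega)]
  have h1 : (j + 1).toNat = j.toNat + 1 := by omega
  have h2 : j.toNat + 1 - i.toNat = (j.toNat - i.toNat) + 1 := by omega
  rw [h1, h2, List.take_add_one]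
  congr 1
  have hlt : j.toNat - i.toNat < (s.drop i.toNat).length := by
    rw [List.length_drop]; omega
  rw [List.getElem?_eq_getElem hlt]
  simp [List.getElem_drop]
  congr 1
  omega

lemma slice_len (s : List Char) (i j : Int) (hi : 0 ≤ i) (hij : i ≤ j)
    (hj : j ≤ (s.length : Int)) :
    PySem.List.len (PySem.List.slice s (some i) (some j)) = j - i := by
  rw [PySem.List.len_eq, PySem.List.slice_toNat s hi (by omega)]
  rw [List.length_take, List.length_drop]
  omega

-- one aligned step: B's step at j matches A's step at j+1, and keeps freq = counter of the slice
lemma step_match (s : List Char) (i j m : Int) (ls : List Char) (hi : 0 ≤ i) (hij : i ≤ j)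
    (hj : j < (s.length : Int)) :
    pvStepB s i (PySem.Dict.counter (PySem.List.slice s (some i) (some j)), m, ls) j
      = (PySem.Dict.counter (PySem.List.slice s (some i) (some (j + 1))),
         pvStepA s i (m, ls) (j + 1)) := by
  have hch : PySem.List.pyGetD s j ' ' = s[j.toNat] :=
    PySem.List.pyGetD_eq_getElem s ' ' (by omega) hj
  have hfreq : (PySem.Dict.counter (PySem.List.slice s (some i) (some j))).insert s[j.toNat]
        ((PySem.Dict.counter (PySem.List.slice s (some i) (some j))).getD s[j.toNat] 0 + 1)
      = PySem.Dict.counter (PySem.List.slice s (some i) (some (j + 1))) := by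
    rw [slice_succ s i j hi hij hj, PySem.Dict.counter_append_singleton]
    rfl
  have hlen : PySem.List.len (PySem.List.slice s (some i) (some (j + 1))) = j - i + 1 := by
    rw [slice_len s i (j + 1) hi (by omega) (by omega)]; ring
  unfold pvStepB pvStepA is_balanced
  simp only [hch, hfreq, pvFreqA_eq_counter, hlen]
  simp only [ne_eq, gt_iff_lt, Bool.and_eq_true, decide_eq_true_eq, ite_not, Bool.if_false_right]
  split_ifs <;> first | rfl | omega

-- inner loops agree: A from j+1 equals (the non-freq part of) B from j, given B carries counter(S[i:j])
lemma inner_match (s : List Char) (i : Int) (hi : 0 ≤ i) :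
    ∀ (k : Nat) (j : Int), i ≤ j → j + k = (s.length : Int) →
    ∀ (m : Int) (ls : List Char),
    ((PySem.List.pyRange j (s.length : Int) 1).foldl (pvStepB s i)
        (PySem.Dict.counter (PySem.List.slice s (some i) (some j)), m, ls)).2
      = (PySem.List.pyRange (j + 1) ((s.length : Int) + 1) 1).foldl (pvStepA s i) (m, ls) := by
  intro k
  induction k with
  | zero =>
    intro j hij hk m ls
    have hj : j = (s.length : Int) := by omega
    rw [hj, PySem.List.pyRange_one_eq_nil (le_refl _),
        PySem.List.pyRange_one_eq_nil (le_refl _)]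
    rfl
  | succ k ih =>
    intro j hij hk m ls
    have hjlt : j < (s.length : Int) := by omega
    rw [PySem.List.pyRange_one_cons hjlt,
        PySem.List.pyRange_one_cons (a := j + 1) (b := (s.length : Int) + 1) (by omega)]
    rw [List.foldl_cons, List.foldl_cons]
    rw [step_match s i j m ls hi hij hjlt]
    rcases hA : pvStepA s i (m, ls) (j + 1) with ⟨m', ls'⟩
    exact ih (j + 1) (by omega) (by omega) m' ls'

-- the empty slice gives the empty counter
lemma counter_slice_self (s : List Char) (i : Int) (hi : 0 ≤ i) :
    PySem.Dict.counter (PySem.List.slice s (some i) (some i))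
      = (PySem.Dict.empty : PySem.Dict Char Int) := by
  rw [PySem.List.slice_toNat s hi hi]
  simp [PySem.Dict.counter_eq_foldl]

-- ===== VERDICT (by name: the statement is the Claim_ definition above) =====
theorem longest_balanced_substring_spec : Claim_equal_longest_balanced_substring := by
  intro S _
  unfold Spec_longest_balanced_substring longest_balanced_substring longest_balanced_substring_alt
  simp only [PySem.List.len_eq]
  have h : List.foldl
        (fun acc i => List.foldl (pvStepA S.toList i) acc
          (PySem.List.pyRange (i + 1) ((S.toList.length : Int) + 1)))
        ((0 : Int), ([] : List Char)) (PySem.List.pyRange 0 (S.toList.length : Int))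
      = List.foldl
        (fun acc i =>
          (List.foldl (pvStepB S.toList i) (PySem.Dict.empty, acc.1, acc.2)
            (PySem.List.pyRange i (S.toList.length : Int))).2)
        ((0 : Int), ([] : List Char)) (PySem.List.pyRange 0 (S.toList.length : Int)) := by
    apply PySem.List.foldl_congr_mem
    intro acc i hmem
    rw [PySem.List.mem_pyRange_one] at hmem
    rcases acc with ⟨m, ls⟩
    rw [← counter_slice_self S.toList i hmem.1]
    exact (inner_match S.toList i hmem.1 (S.toList.length - i.toNat) i (le_refl i)
      (by omega) m ls).symm
  rw [h]
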